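-- pv_equiv track=rewrite | github.com/taylorliu1/py_auto_test | utils/vsphere/VMUtil.py | check_platform
-- ===== SOURCE A (Python) =====
-- OS_INFO = {
--         "Linux":  {
--             "STOS": "STOS",
--             "RHAT": "RHAT",
--             "SLES": "SLES",
--         },
--         "Windows": {
--             "TWin10":   "TWin10",
--         }
--     }
--
-- def check_platform(os):
--     linux = OS_INFO['Linux'].keys()
--     for key in linux:
--         if key == os:
--             return "Linux"
--     windows = OS_INFO['Windows'].keys()
--     for key in windows:
--         if key == os:
--             return "Windows"
--     return None
-- ===== SOURCE B (Python) =====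
-- PLATFORM_BY_OS = {
--     "STOS": "Linux",
--     "RHAT": "Linux",
--     "SLES": "Linux",
--     "TWin10": "Windows",
-- }
--
-- def check_platform(os):
--     return PLATFORM_BY_OS.get(os)
-- ===== Notes on version B (the rewrite author's own statement) =====
-- stated objective: idiomatic
-- what changed: Replaces the two sequential key scans over nested per-platform dicts by a single precomputed inverted table mapping each OS name to its platform, so the body is one dict .get lookup.
import Mathlib
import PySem

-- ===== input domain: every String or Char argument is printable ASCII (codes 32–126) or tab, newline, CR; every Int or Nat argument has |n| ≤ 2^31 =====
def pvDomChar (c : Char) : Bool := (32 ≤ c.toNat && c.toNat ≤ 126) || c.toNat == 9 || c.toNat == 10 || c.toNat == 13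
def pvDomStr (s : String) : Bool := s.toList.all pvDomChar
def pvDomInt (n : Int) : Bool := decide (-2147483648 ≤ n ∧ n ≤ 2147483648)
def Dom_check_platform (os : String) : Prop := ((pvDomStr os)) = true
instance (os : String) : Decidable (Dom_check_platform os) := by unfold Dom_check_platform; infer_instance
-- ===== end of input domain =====

-- B replaces the two sequential key scans with one flat inverted table (OS -> platform) and a single lookup (idiomatic).

-- ===== PORT A =====
-- OS_INFO as in the module: platform -> dict of OS keys
def OS_INFO : PySem.Dict String (PySem.Dict String String) :=
  PySem.Dict.ofList [("Linux", PySem.Dict.ofList [("STOS","STOS"),("RHAT","RHAT"),("SLES","SLES")]),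
                     ("Windows", PySem.Dict.ofList [("TWin10","TWin10")])]

-- the 'for key in keys: if key == os: return <label>' loop, transliterated
def scanKeys (keys : List String) (os : String) (label : String) : Option String :=
  match keys with
  | [] => none
  | k :: rest => if k == os then some label else scanKeys rest os label

def check_platform (os : String) : Option String :=
  let linux := ((OS_INFO.get? "Linux").getD PySem.Dict.empty).keys
  match scanKeys linux os "Linux" with
  | some r => some r
  | none =>
    let windows := ((OS_INFO.get? "Windows").getD PySem.Dict.empty).keys
    match scanKeys windows os "Windows" with
    | some r => some r
    | none => none

-- ===== PORT B =====
def PLATFORM_BY_OS : PySem.Dict String String :=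
  PySem.Dict.ofList [("STOS","Linux"),("RHAT","Linux"),("SLES","Linux"),("TWin10","Windows")]

def check_platform_alt (os : String) : Option String :=
  PLATFORM_BY_OS.get? os

-- ===== PRECONDITION & SPEC =====
def Spec_check_platform (os : String) (out : Option String) : Prop := out = check_platform_alt os
instance (os : String) (out : Option String) : Decidable (Spec_check_platform os out) := by unfold Spec_check_platform; infer_instance

-- ===== CLAIM (what is proved, stated in full; the proofs are below) =====
def Claim_equal_check_platform : Prop := ∀ (os : String), Dom_check_platform os → Spec_check_platform os (check_platform os)

-- ===== LEMMAS AND PROOFS =====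

-- ===== VERDICT (by name: the statement is the Claim_ definition above) =====
theorem check_platform_spec : Claim_equal_check_platform := by
  intro os _
  unfold Spec_check_platform check_platform check_platform_alt
  have hl : ((OS_INFO.get? "Linux").getD PySem.Dict.empty).keys = ["STOS","RHAT","SLES"] := by decide
  have hw : ((OS_INFO.get? "Windows").getD PySem.Dict.empty).keys = ["TWin10"] := by decide
  have hm : PLATFORM_BY_OS =
      PySem.Dict.mk [("STOS","Linux"),("RHAT","Linux"),("SLES","Linux"),("TWin10","Windows")] := by
    decide
  rw [hl, hw, hm]
  simp only [scanKeys, PySem.Dict.get?_mk_cons, beq_iff_eq]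
  split_ifs <;> rfl
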